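-- pv_equiv track=rewrite | github.com/SofiaNechaeva/wal_analyzer | reportbuilder.py | mask_fields
-- ===== SOURCE A (Python) =====
-- def mask_fields(data: dict, masks_fields: list) -> dict:
--     """
--     Маскирует значения словаря по правилам:
--     - Заглавные буквы и цифры → '#'
--     - Строчные буквы → '*'
--     - Знаки и служебные символы остаются как есть
--     """
--     def mask_value(val: str) -> str:
--         if not isinstance(val, str):
--             return val
--         masked = []
--         for ch in val:
--             if ch.isupper() or ch.isdigit():
--                 masked.append('#')
--             elif ch.islower():
--                 masked.append('*')
--             else:
--                 masked.append(ch)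
--         return "".join(masked)
--
--     return {
--         k: mask_value(v) if k in masks_fields else v
--         for k, v in data.items()
--     }
-- ===== SOURCE B (Python) =====
-- def mask_fields(data: dict, masks_fields: list) -> dict:
--     def mask_value(val: str) -> str:
--         if not isinstance(val, str):
--             return val
--         return "".join(
--             '#' if c.isupper() or c.isdigit() else '*' if c.islower() else c
--             for c in val
--         )
--
--     result = dict(data)
--     for field in masks_fields:
--         if field in data:
--             result[field] = mask_value(data[field])
--     return result
-- ===== Notes on version B (the rewrite author's own statement) =====
-- stated objective: faster
-- what changed: B replaces A's dict comprehension over data, which tests every key against the masks_fields list, with a shallow dict copy patched in place by a loop driven by masks_fields using O(1) dict lookups, removing the per-key list scan; the per-char classifier becomes a joined conditional expression.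
import Mathlib
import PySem

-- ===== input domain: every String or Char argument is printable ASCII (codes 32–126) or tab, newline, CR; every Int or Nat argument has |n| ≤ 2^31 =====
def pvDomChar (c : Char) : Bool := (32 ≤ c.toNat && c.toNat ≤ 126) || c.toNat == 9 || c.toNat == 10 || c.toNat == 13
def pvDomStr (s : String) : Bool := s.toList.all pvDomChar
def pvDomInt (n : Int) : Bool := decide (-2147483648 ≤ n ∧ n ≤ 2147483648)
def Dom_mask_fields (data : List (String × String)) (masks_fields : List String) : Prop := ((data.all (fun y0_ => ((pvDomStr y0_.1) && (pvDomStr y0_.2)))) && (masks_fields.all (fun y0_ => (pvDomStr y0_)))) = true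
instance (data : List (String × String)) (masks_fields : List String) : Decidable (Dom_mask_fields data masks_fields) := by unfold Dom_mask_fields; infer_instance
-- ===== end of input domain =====

-- B drives the masking by masks_fields over a shallow dict copy instead of scanning masks_fields for every key of data (objective: faster, measured); equivalence of return values proved for duplicate-free key lists (Python dicts).


-- ===== PORT A =====
-- A's inner mask_value: loop over the characters, appending '#' / '*' / ch, then join.
def maskValueA (val : String) : String :=
  String.ofList (val.toList.foldl
    (fun masked ch =>
      if PySem.Chars.isupper ch || PySem.Chars.isdigit ch then masked ++ ['#']
      else if PySem.Chars.islower ch then masked ++ ['*']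
      else masked ++ [ch]) [])

-- dict comprehension over data.items(): mask_value(v) if k in masks_fields else v
def mask_fields (data : List (String × String)) (masks_fields : List String) : List (String × String) :=
  data.map (fun kv => (kv.1, if masks_fields.contains kv.1 then maskValueA kv.2 else kv.2))

-- ===== PORT B =====
-- B's inner mask_value: a generator expression joined.
def maskValueB (val : String) : String :=
  String.ofList (val.toList.map (fun c =>
    if PySem.Chars.isupper c || PySem.Chars.isdigit c then '#'
    else if PySem.Chars.islower c then '*'
    else c))

-- 'field in data' on the dict: first-match lookup
def lookupFirst : List (String × String) → String → Option String
  | [], _ => none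
  | (k', v') :: rest, k => if k' == k then some v' else lookupFirst rest k

-- 'result[field] = v' on the dict copy: overwrite in place (key exists, position kept)
def setKey : List (String × String) → String → String → List (String × String)
  | [], k, v => [(k, v)]
  | (k', v') :: rest, k, v => if k' == k then (k', v) :: rest else (k', v') :: setKey rest k v

-- result = dict(data); for field in masks_fields: if field in data: result[field] = mask_value(data[field])
def mask_fields_alt (data : List (String × String)) (masks_fields : List String) : List (String × String) :=
  masks_fields.foldl
    (fun result field =>
      match lookupFirst data field with
      | some v => setKey result field (maskValueB v)
      | none => result)
    data

-- ===== PRECONDITION & SPEC =====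
-- Pre_ excludes association lists with repeated keys: a Python dict can never hold two equal
-- keys, so A never receives such an input; on them the list-level first-match/overwrite
-- behaviour of either port would be accidental.
def Pre_mask_fields (data : List (String × String)) (_masks_fields : List String) : Prop :=
  (data.map Prod.fst).Nodup
instance (data : List (String × String)) (masks_fields : List String) : Decidable (Pre_mask_fields data masks_fields) := by unfold Pre_mask_fields; infer_instance
def pvWitness_mask_fields : (List (String × String)) × List String :=
  ([("user", "Ann123"), ("note", "ok!")], ["user", "pwd"])

def Spec_mask_fields (data : List (String × String)) (masks_fields : List String) (out : List (String × String)) : Prop := out = mask_fields_alt data masks_fields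
instance (data : List (String × String)) (masks_fields : List String) (out : List (String × String)) : Decidable (Spec_mask_fields data masks_fields out) := by unfold Spec_mask_fields; infer_instance

-- ===== CLAIM (what is proved, stated in full; the proofs are below) =====
def Claim_equal_mask_fields : Prop := ∀ (data : List (String × String)) (masks_fields : List String), Dom_mask_fields data masks_fields → Pre_mask_fields data masks_fields → Spec_mask_fields data masks_fields (mask_fields data masks_fields)

-- ===== LEMMAS AND PROOFS =====

theorem maskValue_eq (v : String) : maskValueA v = maskValueB v := by
  unfold maskValueA maskValueB
  congr 1
  have h : ∀ (l acc : List Char),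
      l.foldl (fun masked ch =>
        if PySem.Chars.isupper ch || PySem.Chars.isdigit ch then masked ++ ['#']
        else if PySem.Chars.islower ch then masked ++ ['*']
        else masked ++ [ch]) acc
      = acc ++ l.map (fun c =>
          if PySem.Chars.isupper c || PySem.Chars.isdigit c then '#'
          else if PySem.Chars.islower c then '*'
          else c) := by
    intro l
    induction l with
    | nil => simp
    | cons c l ih =>
      intro acc
      simp only [List.foldl_cons, List.map_cons, ih]
      split_ifs <;> simp
  simpa using h v.toList []

-- data rewritten with a key predicate P: the values of keys in P are masked (with B's masker)
def patched (data : List (String × String)) (P : String → Bool) : List (String × String) :=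
  data.map (fun kv => (kv.1, if P kv.1 then maskValueB kv.2 else kv.2))

theorem patched_congr (data : List (String × String)) (P Q : String → Bool)
    (h : ∀ kv ∈ data, P kv.1 = Q kv.1) : patched data P = patched data Q := by
  unfold patched
  exact List.map_congr_left (fun kv hkv => by rw [h kv hkv])

theorem lookupFirst_none {data : List (String × String)} {f : String}
    (h : lookupFirst data f = none) : ∀ kv ∈ data, kv.1 ≠ f := by
  induction data with
  | nil => simp
  | cons hd tl ih =>
    obtain ⟨k', v'⟩ := hd
    unfold lookupFirst at h
    by_cases hk : k' == f
    · simp [hk] at h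
    · intro kv hkv
      rcases List.mem_cons.mp hkv with h1 | h2
      · rw [h1]; simpa using fun he => hk (by simp [he])
      · exact ih (by simpa [hk] using h) kv h2

theorem setKey_patched {data : List (String × String)} {f v : String} (P : String → Bool)
    (hnd : (data.map Prod.fst).Nodup) (h : lookupFirst data f = some v) :
    setKey (patched data P) f (maskValueB v) = patched data (fun k => P k || k == f) := by
  induction data with
  | nil => simp [lookupFirst] at h
  | cons hd tl ih =>
    obtain ⟨k0, v0⟩ := hd
    simp only [List.map_cons, List.nodup_cons] at hnd
    unfold lookupFirst at h
    by_cases hk : k0 == f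
    · have hv : v = v0 := by simp [hk] at h; exact h.symm
      subst hv
      have hkey : (k0 : String) = f := by simpa using hk
      unfold patched setKey
      simp only [List.map_cons]
      rw [if_pos hk]
      have htail : patched tl P = patched tl (fun k => P k || k == f) :=
        patched_congr tl _ _ (fun kv hkv => by
          have : kv.1 ≠ f := fun he => hnd.1 (by
            rw [← hkey] at he
            exact he ▸ List.mem_map_of_mem hkv)
          simp [this])
      unfold patched at htail
      rw [← htail]
      simp [hkey]
    · have h' : lookupFirst tl f = some v := by simpa [hk] using h
      unfold patched setKey
      simp only [List.map_cons]
      rw [if_neg hk]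
      have := ih hnd.2 h'
      unfold patched at this
      rw [this]
      simp [hk]

theorem foldl_patched (data : List (String × String))
    (hnd : (data.map Prod.fst).Nodup) :
    ∀ (ms : List String) (P : String → Bool),
      ms.foldl (fun result field =>
        match lookupFirst data field with
        | some v => setKey result field (maskValueB v)
        | none => result) (patched data P)
      = patched data (fun k => P k || ms.contains k) := by
  intro ms
  induction ms with
  | nil =>
    intro P
    simp only [List.foldl_nil]
    exact patched_congr _ _ _ (fun kv _ => by simp)
  | cons f ms ih =>
    intro P
    simp only [List.foldl_cons]
    have hstep : (match lookupFirst data f with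
        | some v => setKey (patched data P) f (maskValueB v)
        | none => patched data P) = patched data (fun k => P k || k == f) := by
      cases hl : lookupFirst data f with
      | none =>
        exact patched_congr _ _ _ (fun kv hkv => by
          simp [show kv.1 ≠ f from lookupFirst_none hl kv hkv])
      | some v => exact setKey_patched P hnd hl
    rw [hstep, ih]
    exact patched_congr _ _ _ (fun kv _ => by
      simp only [List.contains_cons, Bool.or_assoc])

-- ===== VERDICT (by name: the statement is the Claim_ definition above) =====
theorem mask_fields_spec : Claim_equal_mask_fields := by
  intro data ms _ hpre
  unfold Spec_mask_fields mask_fields mask_fields_alt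
  have h0 : data = patched data (fun _ => false) := by simp [patched]
  calc data.map (fun kv => (kv.1, if ms.contains kv.1 then maskValueA kv.2 else kv.2))
      = patched data (fun k => ms.contains k) := by
        unfold patched
        exact List.map_congr_left (fun kv _ => by rw [maskValue_eq])
    _ = ms.foldl (fun result field =>
          match lookupFirst data field with
          | some v => setKey result field (maskValueB v)
          | none => result) data := by
        have h := foldl_patched data hpre ms (fun _ => false)
        rw [← h0] at h
        rw [h]
        exact patched_congr _ _ _ (fun kv _ => by simp)
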